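-- pv_equiv track=rewrite | github.com/aquastripe/problem-solving | codeforces/1976 Div2/A.py | solve
-- ===== SOURCE A (Python) =====
-- def solve(s):
--     in_letter = False
--     last_digit = '0'
--     last_letter = 'a'
--     for s_i in s:
--         if s_i.isdigit():
--             if in_letter:
--                 return 'NO'
--
--             if last_digit > s_i:
--                 return 'NO'
--
--             last_digit = s_i
--             in_letter = False
--         else:
--             if last_letter > s_i:
--                 return 'NO'
--
--             last_letter = s_i
--             in_letter = True
--     return 'YES'
-- ===== SOURCE B (Python) =====
-- def solve(s):
--     digits = [c for c in s if c.isdigit()]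
--     others = [c for c in s if not c.isdigit()]
--     ok = (list(s) == digits + others
--           and all(a <= b for a, b in zip(digits, digits[1:]))
--           and all(a <= b for a, b in zip(others, others[1:])))
--     return 'YES' if ok else 'NO'
-- ===== Notes on version B (the rewrite author's own statement) =====
-- stated objective: simpler
-- what changed: B replaces A's stateful single pass (in_letter flag plus last_digit/last_letter sentinels) by a declarative check: partition s into digits and non-digits, require the partition to be a prefix/suffix split of s and each part to be non-decreasing.
-- intended difference: On strings that are a sorted digit-prefix followed by a sorted non-digit suffix whose first non-digit character is below 'a' (uppercase letters, punctuation, spaces), A returns 'NO' only because of its last_letter='a' sentinel initialisation, while B returns 'YES', the intended answer for 'digits then letters, each sorted'. — e.g. on solve("A"): A returns "NO", B returns "YES"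
import Mathlib
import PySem

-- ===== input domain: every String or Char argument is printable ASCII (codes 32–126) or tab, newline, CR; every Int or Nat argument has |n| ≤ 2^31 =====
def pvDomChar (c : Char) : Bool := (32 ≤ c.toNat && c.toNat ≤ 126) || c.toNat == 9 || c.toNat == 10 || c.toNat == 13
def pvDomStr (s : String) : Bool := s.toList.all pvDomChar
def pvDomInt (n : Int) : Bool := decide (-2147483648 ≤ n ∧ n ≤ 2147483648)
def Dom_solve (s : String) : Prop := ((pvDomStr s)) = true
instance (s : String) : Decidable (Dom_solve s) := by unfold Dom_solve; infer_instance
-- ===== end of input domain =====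

-- B replaces A's stateful scan (in_letter flag + last_digit/last_letter sentinels) by a declarative
-- partition-and-sortedness check; on sorted inputs whose first non-digit is below 'a' A's sentinel makes it
-- return 'NO' while B returns the intended 'YES' (see D_solve).


-- ===== PORT A =====
-- the for-loop with early returns, as structural recursion over the characters with A's three state variables
def solveLoop : List Char → Bool → Char → Char → String
  | [], _, _, _ => "YES"
  | c :: rest, inLetter, lastDigit, lastLetter =>
    if PySem.Chars.isdigit c then
      if inLetter then "NO"
      else if lastDigit > c then "NO"
      else solveLoop rest false c lastLetter
    else
      if lastLetter > c then "NO"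
      else solveLoop rest true lastDigit c

def solve (s : String) : String := solveLoop s.toList false '0' 'a'

-- ===== PORT B =====
-- all(a <= b for a, b in zip(l, l[1:]))
def nondecB (l : List Char) : Bool := (l.zip l.tail).all (fun p => decide (p.1 ≤ p.2))

def solve_alt (s : String) : String :=
  let digits := s.toList.filter (fun c => PySem.Chars.isdigit c)
  let others := s.toList.filter (fun c => !PySem.Chars.isdigit c)
  if s.toList == digits ++ others && nondecB digits && nondecB others then "YES" else "NO"

-- ===== PRECONDITION & SPEC =====
-- On strings that split as a sorted digit-prefix followed by a sorted non-digit suffix whose first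
-- non-digit is below 'a', A returns 'NO' only because of its last_letter = 'a' sentinel initialisation,
-- while B returns 'YES', the intended answer for "digits then letters, each sorted".
def D_solve (s : String) : Prop :=
  s.toList = s.toList.filter (fun c => PySem.Chars.isdigit c)
               ++ s.toList.filter (fun c => !PySem.Chars.isdigit c)
  ∧ List.IsChain (· ≤ ·) (s.toList.filter (fun c => PySem.Chars.isdigit c))
  ∧ List.IsChain (· ≤ ·) (s.toList.filter (fun c => !PySem.Chars.isdigit c))
  ∧ ((s.toList.filter (fun c => !PySem.Chars.isdigit c)).head?.any
       (fun c => decide (c < 'a'))) = true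

-- fast chain check used only by the Decidable instance below (tail-recursive, so `decide (D_solve …)`
-- evaluates on large literal inputs; proved equal to List.IsChain before the instance uses it)
def fastChain (l : List Char) : Bool :=
  (l.foldl (fun st c => (st.1 && st.2.all (fun p => decide (p ≤ c)), some c))
    (true, (none : Option Char))).1

def chainB : List Char → Bool
  | [] => true
  | [_] => true
  | a :: b :: r => decide (a ≤ b) && chainB (b :: r)

lemma chainB_iff (l : List Char) : chainB l = true ↔ List.IsChain (· ≤ ·) l := by
  induction l with
  | nil => simp [chainB]
  | cons a t ih =>
    cases t with
    | nil => simp [chainB]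
    | cons b r => rw [List.isChain_cons_cons, ← ih]; simp [chainB]

lemma fastChain_eq (l : List Char) : ∀ (b : Bool) (p : Char),
    (l.foldl (fun st c => (st.1 && st.2.all (fun p => decide (p ≤ c)), some c)) (b, some p)).1
    = (b && chainB (p :: l)) := by
  induction l with
  | nil => intro b p; simp [chainB]
  | cons c r ih =>
    intro b p
    rw [List.foldl_cons,
        show (((b, some p).1 && Option.all (fun p => decide (p ≤ c)) (b, some p).2, some c)
            : Bool × Option Char)
          = (b && decide (p ≤ c), some c) by simp,
        ih]
    simp [chainB, Bool.and_assoc]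

lemma fastChain_iff (l : List Char) : fastChain l = true ↔ List.IsChain (· ≤ ·) l := by
  cases l with
  | nil => simp [fastChain]
  | cons c r =>
    rw [fastChain, List.foldl, show ((true && Option.all (fun p => decide (p ≤ c)) none), some c)
        = ((true : Bool), some c) from rfl, fastChain_eq]
    simp [chainB_iff]

instance (s : String) : Decidable (D_solve s) :=
  decidable_of_iff
    (((s.toList == s.toList.filter (fun c => PySem.Chars.isdigit c)
         ++ s.toList.filter (fun c => !PySem.Chars.isdigit c))
      && fastChain (s.toList.filter (fun c => PySem.Chars.isdigit c))
      && fastChain (s.toList.filter (fun c => !PySem.Chars.isdigit c))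
      && ((s.toList.filter (fun c => !PySem.Chars.isdigit c)).head?.any
           (fun c => decide (c < 'a')))) = true)
    (by unfold D_solve
        simp only [Bool.and_eq_true, beq_iff_eq, fastChain_iff]
        tauto)

def Spec_solve (s : String) (out : String) : Prop := ¬ D_solve s → out = solve_alt s
instance (s : String) (out : String) : Decidable (Spec_solve s out) := by unfold Spec_solve; infer_instance

def pvDiffWitness_solve : String := "A"
def pvDiffWitnessOut_solve : String × String := ("NO", "YES")

-- ===== CLAIM (what is proved, stated in full; the proofs are below) =====
def Claim_unchanged_solve : Prop := ∀ (s : String), Dom_solve s → Spec_solve s (solve s)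
def Claim_changed_solve : Prop := Dom_solve (pvDiffWitness_solve) ∧ D_solve (pvDiffWitness_solve) ∧ solve (pvDiffWitness_solve) = pvDiffWitnessOut_solve.1 ∧ solve_alt (pvDiffWitness_solve) = pvDiffWitnessOut_solve.2 ∧ pvDiffWitnessOut_solve.1 ≠ pvDiffWitnessOut_solve.2
def Claim_exact_solve : Prop := ∀ (s : String), Dom_solve s → D_solve s → solve s ≠ solve_alt s

-- ===== LEMMAS AND PROOFS =====

-- Boolean characterisation of A's loop: letter mode
def okL : Char → List Char → Bool
  | _, [] => true
  | ll, c :: r => !PySem.Chars.isdigit c && decide (ll ≤ c) && okL c r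

-- Boolean characterisation of A's loop: digit mode
def okD : Char → Char → List Char → Bool
  | _, _, [] => true
  | ld, ll, c :: r =>
    if PySem.Chars.isdigit c then decide (ld ≤ c) && okD c ll r
    else decide (ll ≤ c) && okL c r

lemma solveLoop_eq (l : List Char) : ∀ (inl : Bool) (ld ll : Char),
    solveLoop l inl ld ll = if (if inl then okL ll l else okD ld ll l) then "YES" else "NO" := by
  induction l with
  | nil => intro inl ld ll; cases inl <;> simp [solveLoop, okL, okD]
  | cons c r ih =>
    intro inl ld ll
    by_cases hd : PySem.Chars.isdigit c = true
    · cases inl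
      · by_cases hle : ld ≤ c
        · simp [solveLoop, okD, hd, not_lt.mpr hle, hle, ih]
        · simp [solveLoop, okD, hd, not_le.mp hle, hle]
      · simp [solveLoop, okL, hd]
    · by_cases hle : ll ≤ c
      · cases inl <;> simp [solveLoop, okL, okD, hd, not_lt.mpr hle, hle, ih]
      · cases inl <;> simp [solveLoop, okL, okD, hd, not_le.mp hle, hle]

lemma okL_iff (l : List Char) : ∀ ll : Char,
    okL ll l = true ↔ (∀ c ∈ l, PySem.Chars.isdigit c = false) ∧ List.IsChain (· ≤ ·) (ll :: l) := by
  induction l with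
  | nil => intro ll; simp [okL]
  | cons c r ih =>
    intro ll
    simp [okL, ih c, List.isChain_cons_cons]
    tauto

lemma okD_iff (l : List Char) : ∀ ld ll : Char,
    okD ld ll l = true ↔
      List.IsChain (· ≤ ·) (ld :: l.takeWhile (fun c => PySem.Chars.isdigit c))
      ∧ (∀ c ∈ l.dropWhile (fun c => PySem.Chars.isdigit c), PySem.Chars.isdigit c = false)
      ∧ List.IsChain (· ≤ ·) (ll :: l.dropWhile (fun c => PySem.Chars.isdigit c)) := by
  induction l with
  | nil => intro ld ll; simp [okD]
  | cons c r ih =>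
    intro ld ll
    by_cases hd : PySem.Chars.isdigit c = true
    · simp [okD, hd, ih c ll, List.isChain_cons_cons]
      tauto
    · simp [okD, hd, okL_iff r c, List.isChain_cons_cons]
      tauto

lemma isChain_cons_head {R : Char → Char → Prop} (a : Char) (l : List Char) :
    List.IsChain R (a :: l) ↔ (∀ b ∈ l.head?, R a b) ∧ List.IsChain R l := by
  cases l <;> simp [List.isChain_cons_cons]

lemma nondecB_iff (l : List Char) : nondecB l = true ↔ List.IsChain (· ≤ ·) l := by
  induction l with
  | nil => simp [nondecB]
  | cons a t ih =>
    cases t with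
    | nil => simp [nondecB]
    | cons b r =>
      rw [List.isChain_cons_cons, ← ih]
      simp [nondecB]

lemma filter_eq_of_split (l : List Char)
    (h : ∀ c ∈ l.dropWhile (fun c => PySem.Chars.isdigit c), PySem.Chars.isdigit c = false) :
    l.filter (fun c => PySem.Chars.isdigit c) = l.takeWhile (fun c => PySem.Chars.isdigit c)
    ∧ l.filter (fun c => !PySem.Chars.isdigit c) = l.dropWhile (fun c => PySem.Chars.isdigit c) := by
  constructor
  · conv_lhs => rw [← List.takeWhile_append_dropWhile (p := fun c => PySem.Chars.isdigit c) (l := l)]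
    rw [List.filter_append,
        List.filter_eq_self.mpr (fun a ha => List.mem_takeWhile_imp ha),
        List.filter_eq_nil_iff.mpr (fun a ha => by simp [h a ha]), List.append_nil]
  · conv_lhs => rw [← List.takeWhile_append_dropWhile (p := fun c => PySem.Chars.isdigit c) (l := l)]
    rw [List.filter_append,
        List.filter_eq_nil_iff.mpr (fun a ha => by simp [List.mem_takeWhile_imp ha]),
        List.filter_eq_self.mpr (fun a ha => by simp [h a ha]), List.nil_append]

-- the split condition "every digit precedes every non-digit"
lemma split_iff (l : List Char) :
    l = l.filter (fun c => PySem.Chars.isdigit c) ++ l.filter (fun c => !PySem.Chars.isdigit c)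
    ↔ (∀ c ∈ l.dropWhile (fun c => PySem.Chars.isdigit c), PySem.Chars.isdigit c = false) := by
  constructor
  · intro he c hc
    rw [he, List.dropWhile_append,
        List.dropWhile_eq_nil_iff.mpr (fun x hx => (List.mem_filter.mp hx).2)] at hc
    simp only [List.isEmpty_nil, if_true] at hc
    have hmem := (List.dropWhile_sublist (l := l.filter (fun c => !PySem.Chars.isdigit c))
      (p := fun c => PySem.Chars.isdigit c)).subset hc
    simpa using (List.mem_filter.mp hmem).2
  · intro h
    rw [(filter_eq_of_split l h).1, (filter_eq_of_split l h).2, List.takeWhile_append_dropWhile]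

lemma zero_le_of_isdigit (c : Char) (h : PySem.Chars.isdigit c = true) : '0' ≤ c := by
  simp [PySem.Chars.isdigit] at h; exact h.1

-- ===== VERDICT (by name: the statement is the Claim_ definition above) =====
theorem solve_spec : Claim_unchanged_solve := by
  intro s _ hD
  rw [solve, solveLoop_eq, solve_alt]
  by_cases hA : okD '0' 'a' s.toList = true
  · obtain ⟨h1, h2, h3⟩ := (okD_iff s.toList '0' 'a').mp hA
    have hsplit := (split_iff s.toList).mpr h2
    obtain ⟨hf1, hf2⟩ := filter_eq_of_split s.toList h2
    have n1 : nondecB (s.toList.filter (fun c => PySem.Chars.isdigit c)) = true :=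
      (nondecB_iff _).mpr (by rw [hf1]; exact h1.tail)
    have n2 : nondecB (s.toList.filter (fun c => !PySem.Chars.isdigit c)) = true :=
      (nondecB_iff _).mpr (by rw [hf2]; exact h3.tail)
    simp [hA, n1, n2, ← hsplit]
  · have hB : ¬(s.toList = s.toList.filter (fun c => PySem.Chars.isdigit c)
        ++ s.toList.filter (fun c => !PySem.Chars.isdigit c)
        ∧ nondecB (s.toList.filter (fun c => PySem.Chars.isdigit c)) = true
        ∧ nondecB (s.toList.filter (fun c => !PySem.Chars.isdigit c)) = true) := by
      rintro ⟨he, n1, n2⟩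
      have h2 := (split_iff s.toList).mp he
      obtain ⟨hf1, hf2⟩ := filter_eq_of_split s.toList h2
      have c1 : List.IsChain (· ≤ ·) (s.toList.takeWhile (fun c => PySem.Chars.isdigit c)) := by
        rw [← hf1]; exact (nondecB_iff _).mp n1
      have c2 : List.IsChain (· ≤ ·) (s.toList.dropWhile (fun c => PySem.Chars.isdigit c)) := by
        rw [← hf2]; exact (nondecB_iff _).mp n2
      by_cases hb : ((s.toList.filter (fun c => !PySem.Chars.isdigit c)).head?.any
          (fun c => decide (c < 'a'))) = true
      · exact hD ⟨he, by rw [hf1]; exact c1, by rw [hf2]; exact c2, hb⟩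
      · apply hA
        apply (okD_iff s.toList '0' 'a').mpr
        refine ⟨(isChain_cons_head _ _).mpr ⟨?_, c1⟩, h2, (isChain_cons_head _ _).mpr ⟨?_, c2⟩⟩
        · intro b hbm
          exact zero_le_of_isdigit b
            (List.mem_takeWhile_imp (List.mem_of_mem_head? hbm))
        · intro b hbm
          rw [hf2] at hb
          by_contra hlt
          exact hb (by cases hhd : (s.toList.dropWhile (fun c => PySem.Chars.isdigit c)).head? with
            | none => rw [hhd] at hbm; simp at hbm
            | some x => rw [hhd] at hbm; simp at hbm; subst hbm; simpa using lt_of_not_ge hlt)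
    have hA' : okD '0' 'a' s.toList = false := by simpa using hA
    simp only [Bool.false_eq_true, if_false, hA']
    rw [if_neg]
    intro hcond
    simp only [Bool.and_eq_true, beq_iff_eq] at hcond
    exact hB ⟨hcond.1.1, hcond.1.2, hcond.2⟩

theorem solve_changed : Claim_changed_solve := by unfold Claim_changed_solve; decide

theorem solve_tight : Claim_exact_solve := by
  intro s _ hD
  obtain ⟨he, c1, c2, hb⟩ := hD
  have h2 := (split_iff s.toList).mp he
  obtain ⟨hf1, hf2⟩ := filter_eq_of_split s.toList h2
  have n1 := (nondecB_iff _).mpr c1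
  have n2 := (nondecB_iff _).mpr c2
  have hBY : solve_alt s = "YES" := by
    rw [solve_alt]; simp [n1, n2, ← he]
  have hA : ¬ okD '0' 'a' s.toList = true := by
    intro hA
    obtain ⟨_, _, h3⟩ := (okD_iff s.toList '0' 'a').mp hA
    rw [← hf2] at h3
    cases hhd : (s.toList.filter (fun c => !PySem.Chars.isdigit c)).head? with
    | none => rw [hhd] at hb; simp at hb
    | some x =>
      rw [hhd] at hb; simp at hb
      have := ((isChain_cons_head 'a' _).mp h3).1 x (by rw [hhd]; simp)
      exact absurd hb (not_lt.mpr this)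
  rw [solve, solveLoop_eq, hBY]
  simp [hA]
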